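-- pv_equiv track=rewrite | github.com/pypi-data/pypi-mirror-401 | packages/pulka/pulka-0.3.0-py3-none-any.whl/pulka/render/status_bar.py | _slice_segments
-- ===== SOURCE A (Python) =====
-- from collections.abc import Sequence
--
-- def _slice_segments(
--     segments: Sequence[tuple[str, str]],
--     start: int,
--     end: int,
-- ) -> list[tuple[str, str]]:
--     if start >= end:
--         return []
--     result: list[tuple[str, str]] = []
--     pos = 0
--     for style, text in segments:
--         if pos >= end:
--             break
--         next_pos = pos + len(text)
--         if next_pos <= start:
--             pos = next_pos
--             continue
--         slice_start = max(0, start - pos)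
--         slice_end = min(len(text), end - pos)
--         chunk = text[slice_start:slice_end]
--         if chunk:
--             if result and result[-1][0] == style:
--                 result[-1] = (style, result[-1][1] + chunk)
--             else:
--                 result.append((style, chunk))
--         pos = next_pos
--     return result
-- ===== SOURCE B (Python) =====
-- def _slice_segments(segments, start, end):
--     # Pass 1: extract the raw non-empty slice of every segment (no merging, no early exit).
--     pieces = []
--     pos = 0
--     for style, text in segments:
--         lo = max(start - pos, 0)
--         hi = min(end - pos, len(text))
--         if lo < hi:
--             pieces.append((style, text[lo:hi]))
--         pos += len(text)
--     # Pass 2: coalesce maximal runs of equal style into one segment each.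
--     out = []
--     i = 0
--     n = len(pieces)
--     while i < n:
--         style, text = pieces[i]
--         j = i + 1
--         while j < n and pieces[j][0] == style:
--             text += pieces[j][1]
--             j += 1
--         out.append((style, text))
--         i = j
--     return out
-- ===== Notes on version B (the rewrite author's own statement) =====
-- stated objective: alternative
-- what changed: B splits A's single guarded loop with inline last-segment merging into two passes: one uniform prefix-sum pass that extracts every non-empty raw slice (no start>=end guard, no break), and a separate run-coalescing pass that joins maximal runs of equal style.
import Mathlib
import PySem

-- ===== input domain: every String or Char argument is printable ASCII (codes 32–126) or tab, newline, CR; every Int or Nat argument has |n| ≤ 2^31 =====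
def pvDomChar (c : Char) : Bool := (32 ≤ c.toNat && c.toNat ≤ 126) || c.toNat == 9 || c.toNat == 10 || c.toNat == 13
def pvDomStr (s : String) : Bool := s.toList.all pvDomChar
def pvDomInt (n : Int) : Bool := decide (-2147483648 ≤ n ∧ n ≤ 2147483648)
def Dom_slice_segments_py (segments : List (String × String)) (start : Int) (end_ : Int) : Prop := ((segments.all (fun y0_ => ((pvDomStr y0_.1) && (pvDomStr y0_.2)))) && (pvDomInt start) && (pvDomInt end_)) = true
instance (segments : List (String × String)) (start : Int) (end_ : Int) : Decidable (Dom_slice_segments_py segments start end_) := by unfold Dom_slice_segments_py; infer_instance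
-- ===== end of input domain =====

-- B re-decomposes A's single merging loop into extract-all-raw-slices then coalesce-equal-style-runs; same results, proved equal (objective: alternative).

-- ===== PORT A =====
-- A's for-loop with break/continue; `result` is kept REVERSED (head = Python's result[-1]),
-- so `result[-1] = (style, result[-1][1] + chunk)` / `result.append(...)` act on the head; reversed at the end.
def sliceSegGoA (start end_ : Int) : List (String × String) → Int → List (String × String) → List (String × String)
  | [], _, result => result
  | (style, text) :: rest, pos, result =>
    if end_ ≤ pos then result                  -- if pos >= end: break
    else
      let next_pos := pos + PySem.Str.len text
      if next_pos ≤ start then sliceSegGoA start end_ rest next_pos result   -- continue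
      else
        let slice_start := max 0 (start - pos)
        let slice_end := min (PySem.Str.len text) (end_ - pos)
        let chunk := PySem.Str.slice text (some slice_start) (some slice_end)
        let result' :=
          if chunk == "" then result           -- `if chunk:` false
          else match result with               -- `if result and result[-1][0] == style`
            | (s, t) :: restRes => if s == style then (style, t ++ chunk) :: restRes
                                   else (style, chunk) :: (s, t) :: restRes
            | [] => [(style, chunk)]
        sliceSegGoA start end_ rest next_pos result'

def slice_segments_py (segments : List (String × String)) (start : Int) (end_ : Int) : List (String × String) :=
  if start ≥ end_ then []
  else (sliceSegGoA start end_ segments 0 []).reverse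

-- ===== PORT B =====
-- B pass 1: raw non-empty slices with a running prefix sum.
def sliceSegPieces (start end_ : Int) : List (String × String) → Int → List (String × String)
  | [], _ => []
  | (style, text) :: rest, pos =>
    let lo := max (start - pos) 0
    let hi := min (end_ - pos) (PySem.Str.len text)
    let tail := sliceSegPieces start end_ rest (pos + PySem.Str.len text)
    if lo < hi then (style, PySem.Str.slice text (some lo) (some hi)) :: tail else tail

-- B inner while: accumulate the texts of the run of `style` starting here; returns (joined text, remainder).
def sliceSegRun (style : String) (text : String) : List (String × String) → String × List (String × String)
  | [] => (text, [])
  | (s, t) :: rest => if s == style then sliceSegRun style (text ++ t) rest else (text, (s, t) :: rest)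

theorem sliceSegRun_length_le (style text : String) (l : List (String × String)) :
    (sliceSegRun style text l).2.length ≤ l.length := by
  induction l generalizing text with
  | nil => simp [sliceSegRun]
  | cons p rest ih =>
    obtain ⟨s, t⟩ := p
    simp only [sliceSegRun]
    split
    · exact Nat.le_succ_of_le (ih _)
    · simp

-- B outer while: coalesce runs.
def sliceSegCoalesce : List (String × String) → List (String × String)
  | [] => []
  | (style, text) :: rest =>
    let r := sliceSegRun style text rest
    (style, r.1) :: sliceSegCoalesce r.2
termination_by l => l.length
decreasing_by
  exact Nat.lt_succ_of_le (sliceSegRun_length_le style text rest)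

def slice_segments_py_alt (segments : List (String × String)) (start : Int) (end_ : Int) : List (String × String) :=
  sliceSegCoalesce (sliceSegPieces start end_ segments 0)

-- ===== PRECONDITION & SPEC =====
def Spec_slice_segments_py (segments : List (String × String)) (start : Int) (end_ : Int) (out : List (String × String)) : Prop := out = slice_segments_py_alt segments start end_
instance (segments : List (String × String)) (start : Int) (end_ : Int) (out : List (String × String)) : Decidable (Spec_slice_segments_py segments start end_ out) := by unfold Spec_slice_segments_py; infer_instance

-- ===== CLAIM (what is proved, stated in full; the proofs are below) =====
def Claim_equal_slice_segments_py : Prop := ∀ (segments : List (String × String)) (start : Int) (end_ : Int), Dom_slice_segments_py segments start end_ → Spec_slice_segments_py segments start end_ (slice_segments_py segments start end_)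

-- ===== LEMMAS AND PROOFS =====

-- A's inline merge step, as a function (for stating the fold invariant).
def sliceSegPush (res : List (String × String)) (p : String × String) : List (String × String) :=
  match res with
  | (s, t) :: restRes => if s == p.1 then (p.1, t ++ p.2) :: restRes else (p.1, p.2) :: (s, t) :: restRes
  | [] => [(p.1, p.2)]

theorem pieces_nil_of_end_le_pos (start end_ : Int) (segs : List (String × String)) (pos : Int)
    (h : end_ ≤ pos) : sliceSegPieces start end_ segs pos = [] := by
  induction segs generalizing pos with
  | nil => rfl
  | cons p rest ih =>
    obtain ⟨style, text⟩ := p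
    have hlen : (0:Int) ≤ PySem.Str.len text := by
      simp [PySem.Str.len]
    simp only [sliceSegPieces]
    rw [if_neg (by omega), ih _ (by omega)]

theorem pieces_nil_of_end_le_start (start end_ : Int) (segs : List (String × String)) (pos : Int)
    (h : end_ ≤ start) : sliceSegPieces start end_ segs pos = [] := by
  induction segs generalizing pos with
  | nil => rfl
  | cons p rest ih =>
    obtain ⟨style, text⟩ := p
    simp only [sliceSegPieces]
    rw [if_neg (by omega), ih _]

-- the chunk A slices is empty exactly when B drops the piece
theorem slice_eq_empty_iff (text : String) (lo hi : Int) (hlo : 0 ≤ lo) (hhi : 0 ≤ hi)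
    (hle : hi ≤ PySem.Str.len text) :
    (PySem.Str.slice text (some lo) (some hi) = "" ↔ ¬ lo < hi) := by
  have hlen : PySem.Str.len text = (text.toList.length : Int) := by
    simp [PySem.Str.len]
  rw [hlen] at hle
  constructor
  · intro h hlt
    have : (PySem.Str.slice text (some lo) (some hi)).toList = [] := by rw [h]; rfl
    rw [PySem.Str.toList_slice, PySem.Chars.slice_eq_listSlice,
        PySem.List.slice_toNat _ hlo hhi] at this
    have h1 : lo.toNat < hi.toNat := by omega
    have h2 : lo.toNat < text.toList.length := by omega
    have h3 := congrArg List.length this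
    rw [List.length_take, List.length_drop] at h3
    simp only [List.length_nil] at h3
    omega
  · intro h
    apply String.toList_eq_nil_iff.mp
    rw [PySem.Str.toList_slice, PySem.Chars.slice_eq_listSlice,
        PySem.List.slice_toNat _ hlo hhi]
    have : hi.toNat - lo.toNat = 0 := by omega
    simp [this]

-- A's loop is the fold of A's merge step over B's raw pieces.
theorem goA_eq_foldl (start end_ : Int) (segs : List (String × String)) (pos : Int)
    (res : List (String × String)) :
    sliceSegGoA start end_ segs pos res = (sliceSegPieces start end_ segs pos).foldl sliceSegPush res := by
  induction segs generalizing pos res with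
  | nil => rfl
  | cons p rest ih =>
    obtain ⟨style, text⟩ := p
    have hlen : PySem.Str.len text = (text.toList.length : Int) := by
      simp [PySem.Str.len]
    by_cases hbrk : end_ ≤ pos
    · rw [pieces_nil_of_end_le_pos _ _ _ _ hbrk]
      simp only [sliceSegGoA]
      rw [if_pos hbrk]
      rfl
    · simp only [sliceSegGoA, sliceSegPieces]
      rw [if_neg hbrk]
      by_cases hskip : pos + PySem.Str.len text ≤ start
      · rw [if_pos hskip, if_neg (by omega), ih]
      · rw [if_neg hskip]
        have hmax : max 0 (start - pos) = max (start - pos) 0 := max_comm _ _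
        have hmin : min (PySem.Str.len text) (end_ - pos) = min (end_ - pos) (PySem.Str.len text) := min_comm _ _
        set lo := max (start - pos) 0 with hlo
        set hi := min (end_ - pos) (PySem.Str.len text) with hhi
        have h0lo : 0 ≤ lo := le_max_right _ _
        have h0hi : 0 ≤ hi := by rw [hhi]; omega
        have hhile : hi ≤ PySem.Str.len text := min_le_right _ _
        have hemp := slice_eq_empty_iff text lo hi h0lo h0hi hhile
        by_cases hlt : lo < hi
        · rw [if_pos hlt]
          have hne : (PySem.Str.slice text (some lo) (some hi) == "") = false := by
            rw [beq_eq_false_iff_ne]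
            intro h; exact (hemp.mp h) hlt
          simp only [hmax, hmin, hne, if_false, Bool.false_eq_true]
          rw [List.foldl_cons, ih]
          congr 1
        · rw [if_neg hlt]
          have heq : (PySem.Str.slice text (some lo) (some hi) == "") = true := by
            rw [beq_iff_eq]; exact hemp.mpr hlt
          simp only [hmax, hmin, heq, if_true]
          exact ih _ _

-- the push-fold, reversed, is the run-coalescing of the pieces
theorem foldl_push_run (l : List (String × String)) (s t : String) (res : List (String × String)) :
    (l.foldl sliceSegPush ((s, t) :: res)).reverse
      = res.reverse ++ (s, (sliceSegRun s t l).1) :: sliceSegCoalesce (sliceSegRun s t l).2 := by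
  induction l generalizing s t res with
  | nil => simp [sliceSegRun, sliceSegCoalesce]
  | cons p rest ih =>
    obtain ⟨s', c⟩ := p
    by_cases hs : s' = s
    · subst hs
      simp only [List.foldl_cons, sliceSegPush, beq_self_eq_true, if_true, sliceSegRun]
      exact ih _ _ _
    · have hs1 : (s == s') = false := by simp [Ne.symm hs]
      have hs2 : (s' == s) = false := by simp [hs]
      simp only [List.foldl_cons, sliceSegPush, hs1, if_false, sliceSegRun, hs2,
        Bool.false_eq_true]
      rw [ih]
      simp only [List.reverse_cons, List.append_assoc, List.cons_append, List.nil_append]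
      congr 2
      rw [sliceSegCoalesce]

theorem foldl_push_coalesce (l : List (String × String)) :
    (l.foldl sliceSegPush []).reverse = sliceSegCoalesce l := by
  cases l with
  | nil => simp [sliceSegCoalesce]
  | cons p rest =>
    obtain ⟨s, t⟩ := p
    have h0 : sliceSegPush [] (s, t) = [(s, t)] := rfl
    rw [List.foldl_cons, h0, foldl_push_run, sliceSegCoalesce]
    simp

-- ===== VERDICT (by name: the statement is the Claim_ definition above) =====
theorem slice_segments_py_spec : Claim_equal_slice_segments_py := by
  intro segments start end_ _
  unfold Spec_slice_segments_py slice_segments_py slice_segments_py_alt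
  by_cases h : start ≥ end_
  · rw [if_pos h, pieces_nil_of_end_le_start _ _ _ _ h]
    simp [sliceSegCoalesce]
  · rw [if_neg h, goA_eq_foldl, foldl_push_coalesce]
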